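-- pv_equiv track=rewrite | github.com/Aadikenchammana/StockAI01 | zPDfunction.py | min_index_find
-- ===== SOURCE A (Python) =====
-- def min_index_find(lst):
--     num = lst[0]
--     index = 0
--     for i in range(len(lst)):
--         if lst[i] <= num:
--             num = lst[i]
--             index = i
--     return num,index
-- ===== SOURCE B (Python) =====
-- def min_index_find(lst):
--     m = lst[0]
--     for v in lst:
--         if v < m:
--             m = v
--     index = 0
--     for i in range(len(lst)):
--         if lst[i] == m:
--             index = i
--     return m, index
-- ===== Notes on version B (the rewrite author's own statement) =====
-- stated objective: simpler
-- what changed: Replaces A's single fused pass tracking both running minimum and update index by two separate passes: one computing the minimum, one recording the last position equal to it.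
import Mathlib
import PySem

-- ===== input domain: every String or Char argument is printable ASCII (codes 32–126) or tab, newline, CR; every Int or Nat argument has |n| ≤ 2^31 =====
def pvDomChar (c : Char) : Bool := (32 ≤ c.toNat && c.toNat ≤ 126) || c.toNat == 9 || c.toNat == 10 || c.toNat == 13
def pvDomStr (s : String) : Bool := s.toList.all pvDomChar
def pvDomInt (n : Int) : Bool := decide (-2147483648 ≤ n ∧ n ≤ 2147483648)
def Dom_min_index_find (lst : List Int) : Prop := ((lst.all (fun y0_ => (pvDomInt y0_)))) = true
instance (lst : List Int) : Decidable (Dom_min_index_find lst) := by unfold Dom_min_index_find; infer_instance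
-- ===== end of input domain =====

-- B: two separate passes (minimum, then last index equal to it) instead of A's fused min-and-index pass; return-value equivalence proved for nonempty lists (A raises IndexError on []).


-- ===== PORT A =====
-- A's loop 'for i in range(len(lst)): if lst[i] <= num: num, index = lst[i], i'
-- as structural recursion over the elements carrying the index i.
def minIndexLoop : List Int → Int → Int → Int → Int × Int
  | [], num, index, _ => (num, index)
  | v :: rest, num, index, i =>
    if v ≤ num then minIndexLoop rest v i (i + 1)
    else minIndexLoop rest num index (i + 1)

def min_index_find (lst : List Int) : Int × Int :=
  match lst with
  | [] => (0, 0)  -- lst[0] raises IndexError in Python; excluded by Pre_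
  | x :: _ => minIndexLoop lst x 0 0

-- ===== PORT B =====
-- first pass: 'for v in lst: if v < m: m = v'
def minLoop : List Int → Int → Int
  | [], m => m
  | v :: rest, m => minLoop rest (if v < m then v else m)

-- second pass: 'for i in range(len(lst)): if lst[i] == m: index = i'
def idxLoop : List Int → Int → Int → Int → Int
  | [], _, _, index => index
  | v :: rest, m, i, index => idxLoop rest m (i + 1) (if v = m then i else index)

def min_index_find_alt (lst : List Int) : Int × Int :=
  match lst with
  | [] => (0, 0)  -- lst[0] raises IndexError in Python; excluded by Pre_
  | x :: _ =>
    let m := minLoop lst x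
    (m, idxLoop lst m 0 0)

-- ===== PRECONDITION & SPEC =====
-- Pre_ excludes only the empty list, on which A raises IndexError.
def Pre_min_index_find (lst : List Int) : Prop := lst ≠ []
instance (lst : List Int) : Decidable (Pre_min_index_find lst) := by unfold Pre_min_index_find; infer_instance
def pvWitness_min_index_find : List Int := [3, 1, 1, 2]

def Spec_min_index_find (lst : List Int) (out : Int × Int) : Prop := out = min_index_find_alt lst
instance (lst : List Int) (out : Int × Int) : Decidable (Spec_min_index_find lst out) := by unfold Spec_min_index_find; infer_instance

-- ===== CLAIM (what is proved, stated in full; the proofs are below) =====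
def Claim_equal_min_index_find : Prop := ∀ (lst : List Int), Dom_min_index_find lst → Pre_min_index_find lst → Spec_min_index_find lst (min_index_find lst)

-- ===== LEMMAS AND PROOFS =====
theorem minLoop_le (l : List Int) (num : Int) : minLoop l num ≤ num := by
  induction l generalizing num with
  | nil => simp [minLoop]
  | cons v rest ih =>
    simp only [minLoop]
    split
    · exact le_trans (ih v) (le_of_lt (by assumption))
    · exact ih num

theorem minLoop_eq_or_mem (l : List Int) (num : Int) :
    minLoop l num = num ∨ minLoop l num ∈ l := by
  induction l generalizing num with
  | nil => simp [minLoop]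
  | cons v rest ih =>
    simp only [minLoop]
    split
    · rcases ih v with h | h
      · exact Or.inr (by simp [h])
      · exact Or.inr (by simp [h])
    · rcases ih num with h | h
      · exact Or.inl h
      · exact Or.inr (by simp [h])

theorem idxLoop_irrel (l : List Int) (m : Int) (hm : m ∈ l) (i a b : Int) :
    idxLoop l m i a = idxLoop l m i b := by
  induction l generalizing i a b with
  | nil => simp at hm
  | cons v rest ih =>
    simp only [idxLoop]
    rcases List.mem_cons.mp hm with h | h
    · subst h; simp
    · split
      · rfl
      · exact ih h _ _ _

theorem key (l : List Int) (num index i : Int) :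
    minIndexLoop l num index i = (minLoop l num, idxLoop l (minLoop l num) i index) := by
  induction l generalizing num index i with
  | nil => simp [minIndexLoop, minLoop, idxLoop]
  | cons v rest ih =>
    simp only [minIndexLoop, minLoop, idxLoop]
    by_cases hv : v ≤ num
    · have hmin : (if v < num then v else num) = v := by
        split
        · rfl
        · omega
      rw [if_pos hv]; simp only [hmin]; rw [ih]
      by_cases hveq : v = minLoop rest v
      · rw [if_pos hveq]
      · rw [if_neg hveq]
        have hmem : minLoop rest v ∈ rest := by
          rcases minLoop_eq_or_mem rest v with h | h
          · exact absurd h.symm hveq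
          · exact h
        exact congrArg _ (idxLoop_irrel rest _ hmem _ _ _)
    · have hmin : (if v < num then v else num) = num := by
        split
        · omega
        · rfl
      rw [if_neg hv]; simp only [hmin]; rw [ih]
      have hne : v ≠ minLoop rest num := by
        have := minLoop_le rest num; omega
      rw [if_neg hne]

-- ===== VERDICT (by name: the statement is the Claim_ definition above) =====
theorem min_index_find_spec : Claim_equal_min_index_find := by
  intro lst _ hpre
  unfold Spec_min_index_find
  match lst with
  | [] => exact absurd rfl hpre
  | x :: rest =>
    simp only [min_index_find, min_index_find_alt]
    exact key (x :: rest) x 0 0
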